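-- pv_equiv track=rewrite | github.com/raeez/chiral-bar-cobar | compute/lib/chern_simons_barcobar.py | _enumerate_integrable_reps
-- ===== SOURCE A (Python) =====
-- def _enumerate_integrable_reps(N: int, k: int):
--     """Enumerate integrable highest weight representations of SU(N) at level k.
--
--     Yields tuples (a_1, ..., a_{N-1}) with a_i >= 0 and sum a_i <= k.
--     """
--     if N <= 1:
--         yield ()
--         return
--     if N == 2:
--         for a in range(k + 1):
--             yield (a,)
--         return
--     # General case: recursive enumeration
--     for a1 in range(k + 1):
--         for rest in _enumerate_integrable_reps(N - 1, k - a1):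
--             yield (a1,) + rest
-- ===== SOURCE B (Python) =====
-- def _enumerate_integrable_reps(N: int, k: int):
--     """Enumerate integrable highest weight representations of SU(N) at level k.
--
--     Iterative: build all (N-1)-tuples level by level, carrying the remaining
--     budget with each partial tuple, instead of recursing on N.
--     """
--     if N <= 1:
--         yield ()
--         return
--     level = [((), k)]
--     n = N - 1
--     while n > 0 and level:
--         level = [(t + (a,), r - a) for (t, r) in level for a in range(r + 1)]
--         n -= 1
--     for t, _ in level:
--         yield t
-- ===== Notes on version B (the rewrite author's own statement) =====
-- stated objective: alternative
-- what changed: Replaces A's recursion on N with an iterative breadth-first construction: partial tuples are extended coordinate by coordinate at the right end, each carrying its remaining budget, stopping early when the level empties. Pre_ excludes inputs with N > 9900 and k >= 0, on which A's recursion depth (about N nested generators) reaches the interpreter's recursion limit and raises RecursionError (a safety margin below the exact limit excludes a narrow band of returning inputs whose values are astronomically long tuples).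
import Mathlib
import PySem

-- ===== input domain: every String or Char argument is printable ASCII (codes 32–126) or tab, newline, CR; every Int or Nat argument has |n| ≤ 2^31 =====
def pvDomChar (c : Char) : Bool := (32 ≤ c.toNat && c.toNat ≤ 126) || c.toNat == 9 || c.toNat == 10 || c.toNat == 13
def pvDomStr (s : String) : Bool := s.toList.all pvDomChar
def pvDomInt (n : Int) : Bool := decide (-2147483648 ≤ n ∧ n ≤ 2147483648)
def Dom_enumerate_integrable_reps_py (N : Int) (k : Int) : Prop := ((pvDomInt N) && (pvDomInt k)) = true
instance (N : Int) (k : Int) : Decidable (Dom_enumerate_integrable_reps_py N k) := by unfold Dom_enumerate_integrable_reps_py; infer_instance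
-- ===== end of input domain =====

-- B replaces A's recursion on N by an iterative level-by-level construction (alternative decomposition, same cost).
-- Both ports collect the generator's yields into a list; neither Python mutates its arguments.

-- ===== PORT A =====
def enumerate_integrable_reps_py (N : Int) (k : Int) : List (List Int) :=
  if N ≤ 1 then [[]]
  else if N = 2 then (PySem.List.pyRange 0 (k + 1) 1).map (fun a => [a])
  else (PySem.List.pyRange 0 (k + 1) 1).flatMap (fun a1 =>
        (enumerate_integrable_reps_py (N - 1) (k - a1)).map (fun rest => a1 :: rest))
termination_by N.toNat
decreasing_by omega

-- ===== PORT B =====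
-- one comprehension step: extend every partial tuple by its next coordinate
def pvStepB (lv : List (List Int × Int)) : List (List Int × Int) :=
  lv.flatMap (fun tr => (PySem.List.pyRange 0 (tr.2 + 1) 1).map (fun a => (tr.1 ++ [a], tr.2 - a)))

-- the 'while n > 0 and level:' loop
def pvLoopB (n : Int) (lv : List (List Int × Int)) : List (List Int × Int) :=
  if 0 < n ∧ lv ≠ [] then pvLoopB (n - 1) (pvStepB lv) else lv
termination_by n.toNat
decreasing_by omega

def enumerate_integrable_reps_py_alt (N : Int) (k : Int) : List (List Int) :=
  if N ≤ 1 then [[]]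
  else (pvLoopB (N - 1) [(([] : List Int), k)]).map Prod.fst

-- ===== PRECONDITION & SPEC =====
-- Pre_ excludes inputs with N > 9900 and k >= 0: there A's recursion (about N nested generators) reaches the
-- interpreter's recursion limit and raises RecursionError (the margin below the exact limit also excludes a
-- narrow band of returning inputs whose values are astronomically long tuples).
def Pre_enumerate_integrable_reps_py (N : Int) (k : Int) : Prop := N ≤ 9900 ∨ k < 0
instance (N : Int) (k : Int) : Decidable (Pre_enumerate_integrable_reps_py N k) := by unfold Pre_enumerate_integrable_reps_py; infer_instance
def pvWitness_enumerate_integrable_reps_py : Int × Int := (3, 2)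

def Spec_enumerate_integrable_reps_py (N : Int) (k : Int) (out : List (List Int)) : Prop := out = enumerate_integrable_reps_py_alt N k
instance (N : Int) (k : Int) (out : List (List Int)) : Decidable (Spec_enumerate_integrable_reps_py N k out) := by unfold Spec_enumerate_integrable_reps_py; infer_instance

-- ===== CLAIM (what is proved, stated in full; the proofs are below) =====
def Claim_equal_enumerate_integrable_reps_py : Prop := ∀ (N : Int) (k : Int), Dom_enumerate_integrable_reps_py N k → Pre_enumerate_integrable_reps_py N k → Spec_enumerate_integrable_reps_py N k (enumerate_integrable_reps_py N k)

-- ===== LEMMAS AND PROOFS =====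

theorem pvLoopB_stop (n : Int) (lv : List (List Int × Int)) (h : ¬ (0 < n ∧ lv ≠ [])) :
    pvLoopB n lv = lv := by
  rw [pvLoopB]; simp [h]

theorem pvLoopB_succ (n : Int) (lv : List (List Int × Int)) (h1 : 0 < n) (h2 : lv ≠ []) :
    pvLoopB n lv = pvLoopB (n - 1) (pvStepB lv) := by
  rw [pvLoopB]; simp [h1, h2]

theorem pvStepB_append (l1 l2 : List (List Int × Int)) :
    pvStepB (l1 ++ l2) = pvStepB l1 ++ pvStepB l2 := by
  simp [pvStepB]

theorem pvLoopB_nil (n : Int) : pvLoopB n [] = [] := by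
  rw [pvLoopB]; simp

theorem pvLoopB_append (n : Nat) (l1 l2 : List (List Int × Int)) :
    pvLoopB (n : Int) (l1 ++ l2) = pvLoopB (n : Int) l1 ++ pvLoopB (n : Int) l2 := by
  induction n generalizing l1 l2 with
  | zero => rw [pvLoopB_stop, pvLoopB_stop, pvLoopB_stop] <;> simp
  | succ m ih =>
    rcases List.eq_nil_or_concat l1 with h1 | _
    · subst h1; simp [pvLoopB_nil]
    rcases List.eq_nil_or_concat l2 with h2 | _
    · subst h2; simp [pvLoopB_nil]
    have hn : (0 : Int) < (m + 1 : Nat) := by exact_mod_cast Nat.succ_pos m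
    have h1' : l1 ≠ [] := by rintro rfl; simp_all
    have h2' : l2 ≠ [] := by rintro rfl; simp_all
    have h12 : l1 ++ l2 ≠ [] := by simp [h1']
    rw [pvLoopB_succ _ _ hn h12, pvLoopB_succ _ _ hn h1', pvLoopB_succ _ _ hn h2',
        pvStepB_append]
    have hc : ((m + 1 : Nat) : Int) - 1 = (m : Int) := by push_cast; ring
    rw [hc]
    exact ih _ _

theorem pvLoopB_map {α : Type} (n : Nat) (xs : List α) (g : α → List Int × Int) :
    pvLoopB (n : Int) (xs.map g) = xs.flatMap (fun x => pvLoopB (n : Int) [g x]) := by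
  induction xs with
  | nil => simp [pvLoopB_nil]
  | cons x t ih =>
    have : (x :: t).map g = [g x] ++ t.map g := by simp
    rw [this, pvLoopB_append, ih]; simp

-- the depth-first recursion tree, indexed by the number of remaining coordinates
def pvF : Nat → Int → List (List Int)
  | 0, _ => [[]]
  | n + 1, r => (PySem.List.pyRange 0 (r + 1) 1).flatMap (fun a => (pvF n (r - a)).map (a :: ·))

theorem pvLoopB_key (n : Nat) (t0 : List Int) (r0 : Int) :
    pvLoopB (n : Int) [(t0, r0)] = (pvF n r0).map (fun s => (t0 ++ s, r0 - s.sum)) := by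
  induction n generalizing t0 r0 with
  | zero => rw [pvLoopB_stop] <;> simp [pvF]
  | succ m ih =>
    have hn : (0 : Int) < ((m + 1 : Nat) : Int) := by exact_mod_cast Nat.succ_pos m
    rw [pvLoopB_succ _ _ hn (by simp)]
    have hc : ((m + 1 : Nat) : Int) - 1 = (m : Int) := by push_cast; ring
    have hstep : pvStepB [(t0, r0)]
        = (PySem.List.pyRange 0 (r0 + 1) 1).map (fun a => (t0 ++ [a], r0 - a)) := by
      simp [pvStepB]
    rw [hc, hstep, pvLoopB_map]
    simp only [pvF, List.map_flatMap]
    apply List.flatMap_congr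
    intro a _
    rw [ih]
    simp [List.map_map, Function.comp_def, List.append_assoc]
    intro s _
    ring

theorem pvF_eq_A (m : Nat) : ∀ (k : Int), enumerate_integrable_reps_py ((m : Int) + 2) k = pvF (m + 1) k := by
  induction m with
  | zero =>
    intro k
    rw [enumerate_integrable_reps_py]
    norm_num [pvF, ← List.map_eq_flatMap]
  | succ p ih =>
    intro k
    rw [enumerate_integrable_reps_py]
    have h1 : ¬ ((p + 1 : Nat) : Int) + 2 ≤ 1 := by push_cast; omega
    have h2 : ¬ ((p + 1 : Nat) : Int) + 2 = 2 := by push_cast; omega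
    have h3 : ((p + 1 : Nat) : Int) + 2 - 1 = (p : Int) + 2 := by push_cast; ring
    simp only [h1, h2, if_false, h3, ih]
    rfl

-- ===== VERDICT (by name: the statement is the Claim_ definition above) =====
theorem enumerate_integrable_reps_py_spec : Claim_equal_enumerate_integrable_reps_py := by
  intro N k _ _
  unfold Spec_enumerate_integrable_reps_py enumerate_integrable_reps_py_alt
  by_cases h : N ≤ 1
  · rw [enumerate_integrable_reps_py]; simp [h]
  · obtain ⟨m, hm⟩ : ∃ m : Nat, N = (m : Int) + 2 := ⟨(N - 2).toNat, by omega⟩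
    subst hm
    have hc : ((m : Int) + 2) - 1 = ((m + 1 : Nat) : Int) := by push_cast; ring
    rw [if_neg h, hc, pvLoopB_key, pvF_eq_A]
    simp [Function.comp_def]
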